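-- pv_equiv track=rewrite | github.com/timrestDm/algo_and_structures_python | Lesson_3/5.py | get_index_max_num
-- ===== SOURCE A (Python) =====
-- def get_index_max_num(a):
--     max = min(a)
--     max_i = 0
--     for i in range(len(a)):
--         if a[i] < 0 and a[i] > max:
--             max = a[i]
--             max_i = i
--     return max_i
-- ===== SOURCE B (Python) =====
-- def get_index_max_num(a):
--     m = min(a)
--     candidates = [x for x in a if x < 0 and x > m]
--     if not candidates:
--         return 0
--     return a.index(max(candidates))
-- ===== Notes on version B (the rewrite author's own statement) =====
-- stated objective: alternative
-- what changed: A's single running-argmax loop over indices is replaced by a three-stage pipeline: filter the candidate values (negative and strictly above min(a)), take their max, and look up that value's first index with list.index; Pre_ excludes only the empty list, on which both raise ValueError via min.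
import Mathlib
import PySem

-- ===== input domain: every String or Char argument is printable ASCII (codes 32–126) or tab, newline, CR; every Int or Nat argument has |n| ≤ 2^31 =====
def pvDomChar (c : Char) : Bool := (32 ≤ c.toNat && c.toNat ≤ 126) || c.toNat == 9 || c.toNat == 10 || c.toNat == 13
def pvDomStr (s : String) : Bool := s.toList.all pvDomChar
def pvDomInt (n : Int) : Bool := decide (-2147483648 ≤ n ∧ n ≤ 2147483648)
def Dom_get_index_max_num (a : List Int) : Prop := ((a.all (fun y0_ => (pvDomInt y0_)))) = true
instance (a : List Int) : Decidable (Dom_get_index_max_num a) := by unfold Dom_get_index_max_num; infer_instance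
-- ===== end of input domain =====

-- B replaces A's single running-argmax loop by a filter → max → first-index pipeline (same O(n) cost, different decomposition).


-- ===== PORT A =====
-- literal transliteration of A: max = min(a); loop over range(len(a)) updating (max, max_i)
def get_index_max_num (a : List Int) : Int :=
  match PySem.List.min? a id with
  | none => 0   -- min([]) raises ValueError; excluded by Pre_
  | some m =>
    let r := (PySem.List.pyRange 0 a.length 1).foldl
      (fun (st : Int × Int) i =>
        if PySem.List.pyGetD a i 0 < 0 ∧ PySem.List.pyGetD a i 0 > st.1 then
          (PySem.List.pyGetD a i 0, i)
        else st) (m, 0)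
    r.2

-- ===== PORT B =====
-- literal transliteration of B: m = min(a); candidates = [x for x in a if x < 0 and x > m];
-- if not candidates: return 0; return a.index(max(candidates))
def get_index_max_num_alt (a : List Int) : Int :=
  match PySem.List.min? a id with
  | none => 0   -- min([]) raises ValueError; excluded by Pre_
  | some m =>
    let candidates := a.filter (fun x => decide (x < 0) && decide (x > m))
    if candidates = [] then 0
    else
      match PySem.List.max? candidates id with
      | none => 0   -- unreachable: candidates ≠ []
      | some t =>
        match PySem.List.index? a t with
        | some i => (i : Int)
        | none => 0   -- unreachable: t ∈ candidates ⊆ a, so .index never raises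

-- ===== PRECONDITION & SPEC =====
-- Pre_ excludes exactly the empty list, on which min(a) raises ValueError in both A and B.
def Pre_get_index_max_num (a : List Int) : Prop := a ≠ []
instance (a : List Int) : Decidable (Pre_get_index_max_num a) := by unfold Pre_get_index_max_num; infer_instance
def pvWitness_get_index_max_num : List Int := [-3, -1, -2]

def Spec_get_index_max_num (a : List Int) (out : Int) : Prop := out = get_index_max_num_alt a
instance (a : List Int) (out : Int) : Decidable (Spec_get_index_max_num a out) := by unfold Spec_get_index_max_num; infer_instance

-- ===== CLAIM (what is proved, stated in full; the proofs are below) =====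
def Claim_equal_get_index_max_num : Prop := ∀ (a : List Int), Dom_get_index_max_num a → Pre_get_index_max_num a → Spec_get_index_max_num a (get_index_max_num a)

-- ===== LEMMAS AND PROOFS =====

-- max? over an appended singleton: one more comparison step of the same fold
theorem pv_max?_app_none (c : List Int) (x : Int) (h : PySem.List.max? c id = none) :
    PySem.List.max? (c ++ [x]) id = some x := by
  unfold PySem.List.max? at h ⊢
  rw [List.foldl_append, h]
  rfl

theorem pv_max?_app_some (c : List Int) (x M : Int) (h : PySem.List.max? c id = some M) :
    PySem.List.max? (c ++ [x]) id = if M < x then some x else some M := by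
  unfold PySem.List.max? at h ⊢
  rw [List.foldl_append, h]
  rfl

-- the loop invariant: A's fold computes the max candidate value and its first index
theorem pv_loop_inv (m : Int) (a : List Int) :
    (PySem.List.pyRange 0 a.length 1).foldl
      (fun (st : Int × Int) i =>
        if PySem.List.pyGetD a i 0 < 0 ∧ PySem.List.pyGetD a i 0 > st.1 then
          (PySem.List.pyGetD a i 0, i)
        else st) (m, 0)
    = (match PySem.List.max? (a.filter (fun x => decide (x < 0) && decide (x > m))) id with
       | none => (m, 0)
       | some M => (M, ((PySem.List.index? a M).getD 0 : Int))) := by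
  induction a using List.reverseRecOn with
  | nil => simp [PySem.List.pyRange_one_eq_nil, PySem.List.max?]
  | append_singleton a x ih =>
    have hlen : ((a ++ [x]).length : Int) = (a.length : Int) + 1 := by simp
    rw [hlen, PySem.List.pyRange_one_succ_right (by positivity), List.foldl_append]
    -- on the prefix indices, (a ++ [x])[i] = a[i]
    have hpre : ∀ (st : Int × Int), ∀ i ∈ PySem.List.pyRange 0 (a.length : Int) 1,
        (if PySem.List.pyGetD (a ++ [x]) i 0 < 0 ∧ PySem.List.pyGetD (a ++ [x]) i 0 > st.1 then
          (PySem.List.pyGetD (a ++ [x]) i 0, i) else st)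
        = (if PySem.List.pyGetD a i 0 < 0 ∧ PySem.List.pyGetD a i 0 > st.1 then
          (PySem.List.pyGetD a i 0, i) else st) := by
      intro st i hi
      rw [PySem.List.mem_pyRange_one] at hi
      have hget : PySem.List.pyGetD (a ++ [x]) i 0 = PySem.List.pyGetD a i 0 := by
        rw [PySem.List.pyGetD_eq_getElem (a ++ [x]) 0 hi.1 (by simp; omega),
            PySem.List.pyGetD_eq_getElem a 0 hi.1 (by omega)]
        exact List.getElem_append_left (by omega)
      rw [hget]
    rw [PySem.List.foldl_congr_mem _ _ _ _ hpre, ih, List.foldl_cons, List.foldl_nil]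
    have hx : PySem.List.pyGetD (a ++ [x]) (a.length : Int) 0 = x := by
      rw [PySem.List.pyGetD_eq_getElem (a ++ [x]) 0 (by positivity) (by simp)]
      simp
    simp only [List.filter_append, List.filter_cons, List.filter_nil]
    have hMmem : ∀ M, PySem.List.max? (a.filter (fun x => decide (x < 0) && decide (x > m))) id = some M →
        M ∈ a ∧ M < 0 ∧ M > m := by
      intro M hM
      have := PySem.List.max?_mem hM
      simp only [List.mem_filter, Bool.and_eq_true, decide_eq_true_eq] at this
      exact ⟨this.1, this.2.1, this.2.2⟩
    by_cases hcand : x < 0 ∧ x > m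
    · -- x is a candidate: it is appended to the filtered list
      have hdec : (decide (x < 0) && decide (x > m)) = true := by
        simp [hcand.1, hcand.2]
      rw [hdec]
      simp only [if_true]
      rcases hM : PySem.List.max? (a.filter (fun x => decide (x < 0) && decide (x > m))) id
        with _ | M
      · -- no earlier candidate: the filtered prefix is empty, x starts a new maximum
        have hfe : a.filter (fun x => decide (x < 0) && decide (x > m)) = [] :=
          (PySem.List.max?_eq_none_iff _ _).mp hM
        have hxa : x ∉ a := by
          intro hmem
          have : x ∈ a.filter (fun x => decide (x < 0) && decide (x > m)) := by
            simp [List.mem_filter, hmem, hcand.1, hcand.2]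
          rw [hfe] at this; exact (List.not_mem_nil) this
        have hidx := PySem.List.index?_append_singleton_self a x hxa
        rw [PySem.List.index?_eq_idxOf?] at hidx
        rw [pv_max?_app_none _ x hM, hx]
        simp [hcand.1, hcand.2, hidx]
      · obtain ⟨hMa, hMneg, hMm⟩ := hMmem M hM
        by_cases hxM : M < x
        · -- x beats the old maximum: A updates, B's max picks x, which is new to a
          have hxa : x ∉ a := by
            intro hmem
            have hxf : x ∈ a.filter (fun x => decide (x < 0) && decide (x > m)) := by
              simp [List.mem_filter, hmem, hcand.1, hcand.2]
            exact absurd (PySem.List.max?_isMax hM x hxf) (by simpa using hxM)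
          have hidx := PySem.List.index?_append_singleton_self a x hxa
          rw [PySem.List.index?_eq_idxOf?] at hidx
          rw [pv_max?_app_some _ x M hM, if_pos hxM, hx]
          simp [hcand.1, hxM, hidx]
        · -- x does not beat M: both sides keep (M, first index of M in a)
          have hidx := PySem.List.index?_append_of_mem (l := a) [x] hMa
          rw [PySem.List.index?_eq_idxOf?, PySem.List.index?_eq_idxOf?] at hidx
          rw [pv_max?_app_some _ x M hM, if_neg hxM, hx]
          simp [hxM, hidx]
    · -- x is not a candidate: the filtered list and the loop state are unchanged
      have hdec : (decide (x < 0) && decide (x > m)) = false := by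
        rcases not_and_or.mp hcand with h | h <;> simp [h]
      rw [hdec]
      simp only [Bool.false_eq_true, if_false, List.append_nil]
      rcases hM : PySem.List.max? (a.filter (fun x => decide (x < 0) && decide (x > m))) id
        with _ | M
      · rw [hx]
        simp [hcand]
      · obtain ⟨hMa, hMneg, hMm⟩ := hMmem M hM
        have hfalse : ¬(x < 0 ∧ x > M) := by
          rintro ⟨h1, h2⟩; exact hcand ⟨h1, lt_trans hMm h2⟩
        have hidx := PySem.List.index?_append_of_mem (l := a) [x] hMa
        rw [PySem.List.index?_eq_idxOf?, PySem.List.index?_eq_idxOf?] at hidx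
        rw [hx]
        simp [hfalse, hidx]

-- ===== VERDICT (by name: the statement is the Claim_ definition above) =====
theorem get_index_max_num_spec : Claim_equal_get_index_max_num := by
  intro a _ hpre
  unfold Spec_get_index_max_num get_index_max_num get_index_max_num_alt
  rcases hmin : PySem.List.min? a id with _ | m
  · exact absurd ((PySem.List.min?_eq_none_iff a id).mp hmin) hpre
  · simp only []
    rw [pv_loop_inv m a]
    rcases hM : PySem.List.max? (a.filter (fun x => decide (x < 0) && decide (x > m))) id
      with _ | M
    · rw [if_pos ((PySem.List.max?_eq_none_iff _ _).mp hM)]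
    · have hne : a.filter (fun x => decide (x < 0) && decide (x > m)) ≠ [] := by
        intro h; rw [h] at hM
        have h0 : (none : Option Int) = some M :=
          ((PySem.List.max?_eq_none_iff ([] : List Int) id).mpr rfl).symm.trans hM
        simp at h0
      rw [if_neg hne]
      have hMa : M ∈ a := List.mem_of_mem_filter (PySem.List.max?_mem hM)
      obtain ⟨i, hi⟩ := Option.isSome_iff_exists.mp ((PySem.List.index?_isSome_iff a M).mpr hMa)
      rw [PySem.List.index?_eq_idxOf?] at hi
      simp [hi]
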